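-- pv_equiv track=rewrite | github.com/hoggl-dsp/GenMusPianoAccompaniment | songify/melody_harmonizer.py | invert_chords_below_melody
-- ===== SOURCE A (Python) =====
-- def invert_chords_below_melody(midi_chords, melody_midi_notes):
--     """
--     Inverts chord notes so they fall below the corresponding melody note in MIDI pitch.
--
--     Args:
--         midi_chords (list of list of ints): Chord notes in MIDI numbers.
--         melody_midi_notes (list of ints): Melody notes in MIDI numbers.
--
--     Returns:
--         list of list of ints: Inverted chord MIDI note lists.
--     """
--     inverted_chords = []
--
--     for chord, melody_note in zip(midi_chords, melody_midi_notes):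
--         inverted_chord = []
--         for note in chord:
--             # If a chord note is higher than the melody note, drop it by an octave
--             while note >= melody_note:
--                 note -= 12
--             inverted_chord.append(note)
--         inverted_chords.append(inverted_chord)
--
--     return inverted_chords
-- ===== SOURCE B (Python) =====
-- def invert_chords_below_melody(midi_chords, melody_midi_notes):
--     """Closed-form octave drop: no inner while loop."""
--     return [
--         [note - 12 * max(0, (note - melody_note) // 12 + 1) for note in chord]
--         for chord, melody_note in zip(midi_chords, melody_midi_notes)
--     ]
-- ===== Notes on version B (the rewrite author's own statement) =====
-- stated objective: simpler
-- what changed: Replaces the inner while-loop that repeatedly subtracts 12 with a single closed-form octave drop (note -= 12*max(0, (note-melody_note)//12+1)) and builds the result with nested comprehensions instead of append loops.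
import Mathlib
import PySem

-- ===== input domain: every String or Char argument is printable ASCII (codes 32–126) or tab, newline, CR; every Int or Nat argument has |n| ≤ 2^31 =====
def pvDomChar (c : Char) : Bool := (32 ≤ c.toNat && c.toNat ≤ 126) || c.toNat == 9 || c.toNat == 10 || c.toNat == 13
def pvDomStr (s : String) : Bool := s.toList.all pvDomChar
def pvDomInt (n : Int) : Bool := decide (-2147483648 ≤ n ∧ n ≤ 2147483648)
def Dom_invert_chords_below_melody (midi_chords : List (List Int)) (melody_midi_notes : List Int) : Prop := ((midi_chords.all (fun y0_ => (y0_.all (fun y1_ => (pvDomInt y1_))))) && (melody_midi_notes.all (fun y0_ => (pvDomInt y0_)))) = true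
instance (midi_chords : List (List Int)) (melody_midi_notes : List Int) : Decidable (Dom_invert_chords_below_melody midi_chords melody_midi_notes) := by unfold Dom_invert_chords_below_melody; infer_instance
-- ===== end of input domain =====

-- B replaces A's inner `while note >= melody_note: note -= 12` loop by a single
-- closed-form octave drop (floor division), in nested comprehensions: objective 'simpler'.

-- ===== PORT A =====
-- the inner while loop: while note >= melody_note: note -= 12
def pvDropLoop (note melody_note : Int) : Int :=
  if _h : note ≥ melody_note then pvDropLoop (note - 12) melody_note else note
termination_by (note - melody_note + 12).toNat
decreasing_by omega

def invert_chords_below_melody (midi_chords : List (List Int)) (melody_midi_notes : List Int) : List (List Int) :=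
  (midi_chords.zip melody_midi_notes).foldl
    (fun inverted_chords (p : List Int × Int) =>
      let inverted_chord := p.1.foldl (fun acc note => acc ++ [pvDropLoop note p.2]) []
      inverted_chords ++ [inverted_chord]) []

-- ===== PORT B =====
def invert_chords_below_melody_alt (midi_chords : List (List Int)) (melody_midi_notes : List Int) : List (List Int) :=
  (midi_chords.zip melody_midi_notes).map
    (fun p => p.1.map (fun note => note - 12 * max 0 (PySem.Int.floordiv (note - p.2) 12 + 1)))

-- ===== PRECONDITION & SPEC =====
def Spec_invert_chords_below_melody (midi_chords : List (List Int)) (melody_midi_notes : List Int) (out : List (List Int)) : Prop := out = invert_chords_below_melody_alt midi_chords melody_midi_notes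
instance (midi_chords : List (List Int)) (melody_midi_notes : List Int) (out : List (List Int)) : Decidable (Spec_invert_chords_below_melody midi_chords melody_midi_notes out) := by unfold Spec_invert_chords_below_melody; infer_instance

-- ===== CLAIM (what is proved, stated in full; the proofs are below) =====
def Claim_equal_invert_chords_below_melody : Prop := ∀ (midi_chords : List (List Int)) (melody_midi_notes : List Int), Dom_invert_chords_below_melody midi_chords melody_midi_notes → Spec_invert_chords_below_melody midi_chords melody_midi_notes (invert_chords_below_melody midi_chords melody_midi_notes)

-- ===== LEMMAS AND PROOFS =====

theorem pvDropLoop_eq (note melody_note : Int) :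
    pvDropLoop note melody_note = note - 12 * max 0 (PySem.Int.floordiv (note - melody_note) 12 + 1) := by
  unfold pvDropLoop
  rw [PySem.Int.floordiv_eq_ediv_of_pos (a := note - melody_note) (by norm_num)]
  split
  · rw [pvDropLoop_eq (note - 12) melody_note]
    rw [PySem.Int.floordiv_eq_ediv_of_pos (a := note - 12 - melody_note) (by norm_num)]
    omega
  · omega
termination_by (note - melody_note + 12).toNat
decreasing_by omega

theorem foldl_append_map {α β : Type} (f : α → β) (l : List α) (acc : List β) :
    l.foldl (fun a x => a ++ [f x]) acc = acc ++ l.map f := by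
  induction l generalizing acc with
  | nil => simp
  | cons x xs ih => simp [List.foldl, ih]

-- ===== VERDICT (by name: the statement is the Claim_ definition above) =====
theorem invert_chords_below_melody_spec : Claim_equal_invert_chords_below_melody := by
  intro midi_chords melody_midi_notes _
  show _ = _
  unfold invert_chords_below_melody invert_chords_below_melody_alt
  rw [show (fun inverted_chords (p : List Int × Int) =>
        inverted_chords ++ [p.1.foldl (fun acc note => acc ++ [pvDropLoop note p.2]) []])
      = (fun inverted_chords (p : List Int × Int) =>
        inverted_chords ++ [p.1.map (fun note => note - 12 * max 0 (PySem.Int.floordiv (note - p.2) 12 + 1))]) from ?_]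
  · rw [foldl_append_map (f := fun p : List Int × Int =>
        p.1.map (fun note => note - 12 * max 0 (PySem.Int.floordiv (note - p.2) 12 + 1)))]
    simp
  · funext acc p
    rw [foldl_append_map]
    simp only [List.nil_append, pvDropLoop_eq]
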